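-- pv_equiv track=rewrite | github.com/Skyoxima/Cryptography_and_Hashing | simplified_DES.py | ascii_list_binarizer
-- ===== SOURCE A (Python) =====
-- def dec_to_binary(dec_num):
--   def mechanism(num):
--     if num >= 1:
--       mechanism(num // 2)
--       bin_list.append(num % 2)
--   bin_list = []
--   mechanism(dec_num)
--   return bin_list
--
-- def ascii_list_binarizer(ascii_list):
--   binary_list = []
--   for num in ascii_list:
--     bin_num = dec_to_binary(num)
--     while len(bin_num) != 8:        # regulation -> compulsorily 8 bits to represent every number
--       bin_num.insert(0, 0)
--     binary_list.extend(bin_num)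
--   return binary_list
-- ===== SOURCE B (Python) =====
-- def ascii_list_binarizer(ascii_list):
--     out = []
--     for num in ascii_list:
--         bits = []          # least-significant bit first
--         n = num
--         while n >= 1:
--             bits.append(n % 2)
--             n //= 2
--         out.extend([0] * (8 - len(bits)))   # arithmetic front-padding to 8 bits
--         out.extend(reversed(bits))          # MSB-first
--     return out
-- ===== Notes on version B (the rewrite author's own statement) =====
-- stated objective: simpler
-- what changed: Replaces the recursive inner-function-with-shared-mutable-list bit conversion and the one-at-a-time front-insertion padding loop by a single iterative LSB-first divide loop plus arithmetic front-padding and a reverse.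
import Mathlib
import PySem

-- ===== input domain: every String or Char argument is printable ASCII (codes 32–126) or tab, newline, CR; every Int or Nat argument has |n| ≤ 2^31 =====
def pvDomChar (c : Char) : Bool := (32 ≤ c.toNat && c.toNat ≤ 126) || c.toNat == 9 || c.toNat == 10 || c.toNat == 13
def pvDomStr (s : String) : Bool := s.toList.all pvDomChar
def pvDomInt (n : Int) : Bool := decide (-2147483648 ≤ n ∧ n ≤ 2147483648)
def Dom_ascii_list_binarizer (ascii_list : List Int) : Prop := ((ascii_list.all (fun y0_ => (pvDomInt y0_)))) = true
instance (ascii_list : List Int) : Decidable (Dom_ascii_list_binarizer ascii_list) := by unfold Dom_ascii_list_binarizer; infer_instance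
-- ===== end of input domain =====

-- B replaces A's recursive bit conversion and insert(0,0) padding loop by an iterative
-- LSB-first divide loop with arithmetic front-padding; same values, different decomposition.


-- ===== PORT A =====
-- inner recursive 'mechanism': appends to bin_list in MSB-first order
def pvMechanism (num : Int) : List Int :=
  if num ≥ 1 then pvMechanism (PySem.Int.floordiv num 2) ++ [PySem.Int.mod num 2]
  else []
termination_by num.toNat
decreasing_by
  have hpos : 0 < num := by omega
  clear hpos
  have := PySem.Int.floordiv_eq_ediv_of_pos (a := num) (b := 2) (by omega)
  rw [this]; omega

-- 'while len(bin_num) != 8: bin_num.insert(0,0)' — fuel 8 suffices whenever len ≤ 8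
def pvPadA (fuel : Nat) (l : List Int) : List Int :=
  match fuel with
  | 0 => l
  | f + 1 => if l.length ≠ 8 then pvPadA f (0 :: l) else l

def ascii_list_binarizer (ascii_list : List Int) : List Int :=
  ascii_list.foldl (fun binary_list num => binary_list ++ pvPadA 8 (pvMechanism num)) []

-- ===== PORT B =====
-- iterative 'while n >= 1: bits.append(n % 2); n //= 2' — list built LSB-first
def pvBitsB (n : Int) : List Int :=
  if n ≥ 1 then PySem.Int.mod n 2 :: pvBitsB (PySem.Int.floordiv n 2)
  else []
termination_by n.toNat
decreasing_by
  have hpos : 0 < n := by omega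
  clear hpos
  have := PySem.Int.floordiv_eq_ediv_of_pos (a := n) (b := 2) (by omega)
  rw [this]; omega

def ascii_list_binarizer_alt (ascii_list : List Int) : List Int :=
  ascii_list.foldl
    (fun out num =>
      let bits := pvBitsB num
      out ++ List.replicate (8 - bits.length) 0 ++ bits.reverse) []

-- ===== PRECONDITION & SPEC =====
-- A's padding loop never terminates when an element needs more than 8 bits, so those inputs are excluded.
def Pre_ascii_list_binarizer (ascii_list : List Int) : Prop :=
  ∀ n ∈ ascii_list, n < 256
instance (ascii_list : List Int) : Decidable (Pre_ascii_list_binarizer ascii_list) := by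
  unfold Pre_ascii_list_binarizer; infer_instance

def pvWitness_ascii_list_binarizer : List Int := [72, 105, 0, -3, 255]

def Spec_ascii_list_binarizer (ascii_list : List Int) (out : List Int) : Prop := out = ascii_list_binarizer_alt ascii_list
instance (ascii_list : List Int) (out : List Int) : Decidable (Spec_ascii_list_binarizer ascii_list out) := by unfold Spec_ascii_list_binarizer; infer_instance

-- ===== CLAIM (what is proved, stated in full; the proofs are below) =====
def Claim_equal_ascii_list_binarizer : Prop := ∀ (ascii_list : List Int), Dom_ascii_list_binarizer ascii_list → Pre_ascii_list_binarizer ascii_list → Spec_ascii_list_binarizer ascii_list (ascii_list_binarizer ascii_list)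

-- ===== LEMMAS AND PROOFS =====

-- A's recursion emits exactly B's LSB-first list, reversed
theorem pvMechanism_eq_reverse (n : Int) : pvMechanism n = (pvBitsB n).reverse := by
  by_cases h : n ≥ 1
  · rw [pvMechanism, pvBitsB, if_pos h, if_pos h, List.reverse_cons,
        pvMechanism_eq_reverse (PySem.Int.floordiv n 2)]
  · rw [pvMechanism, pvBitsB, if_neg h, if_neg h, List.reverse_nil]
termination_by n.toNat
decreasing_by
  have := PySem.Int.floordiv_eq_ediv_of_pos (a := n) (b := 2) (by omega)
  rw [this]; omega

theorem pvBitsB_length_le (k : Nat) (n : Int) (h : n < 2 ^ k) : (pvBitsB n).length ≤ k := by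
  induction k generalizing n with
  | zero =>
    rw [pvBitsB, if_neg (by simp at h; omega)]; simp
  | succ k ih =>
    by_cases h1 : n ≥ 1
    · rw [pvBitsB, if_pos h1]
      have hd := PySem.Int.floordiv_eq_ediv_of_pos (a := n) (b := 2) (by omega)
      have : PySem.Int.floordiv n 2 < 2 ^ k := by
        rw [hd]; rw [pow_succ] at h; omega
      simpa using ih _ this
    · rw [pvBitsB, if_neg h1]; simp

theorem pvPadA_eq_replicate (fuel : Nat) (l : List Int) (h : l.length + fuel = 8) :
    pvPadA fuel l = List.replicate (8 - l.length) 0 ++ l := by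
  induction fuel generalizing l with
  | zero =>
    rw [pvPadA]
    have : l.length = 8 := by omega
    simp [this]
  | succ f ih =>
    rw [pvPadA, if_pos (by omega)]
    rw [ih (0 :: l) (by simp; omega)]
    have h1 : 8 - (0 :: l).length = 8 - l.length - 1 := by simp; omega
    rw [h1]
    have h2 : (0 : Int) :: l = [0] ++ l := rfl
    rw [h2, ← List.append_assoc]
    congr 1
    have h3 : 8 - l.length = (8 - l.length - 1) + 1 := by omega
    rw [h3, List.replicate_succ']
    congr 2

-- per-element equality under the precondition
theorem pvElem_eq (n : Int) (h : n < 256) :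
    pvPadA 8 (pvMechanism n) = List.replicate (8 - (pvBitsB n).length) 0 ++ (pvBitsB n).reverse := by
  have hl : (pvBitsB n).length ≤ 8 := pvBitsB_length_le 8 n (by norm_num; omega)
  rw [pvMechanism_eq_reverse]
  have hrevlen0 : (pvBitsB n).reverse.length = (pvBitsB n).length := by simp
  have hfuel : (pvBitsB n).reverse.length + (8 - (pvBitsB n).reverse.length) = 8 := by
    rw [hrevlen0]; omega
  have := pvPadA_eq_replicate (8 - (pvBitsB n).reverse.length) (pvBitsB n).reverse hfuel
  -- adjust fuel: pvPadA with more fuel than needed gives the same result once length hits 8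
  have hfull : ∀ fuel l, l.length = 8 → pvPadA fuel l = l := by
    intro fuel l hlen
    cases fuel with
    | zero => rfl
    | succ f => rw [pvPadA, if_neg (by omega)]
  -- show pvPadA 8 l = pvPadA (8 - l.length) l for l.length ≤ 8 by splitting fuel
  have hsplit : ∀ (extra need : Nat) (l : List Int), l.length + need = 8 →
      pvPadA (need + extra) l = pvPadA need l := by
    intro extra need
    induction need with
    | zero =>
      intro l hlen
      rw [pvPadA]
      exact hfull _ l (by omega)
    | succ m ih =>
      intro l hlen
      have : m + 1 + extra = (m + extra) + 1 := by omega
      rw [this, pvPadA, pvPadA, if_pos (by omega), if_pos (by omega)]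
      exact ih (0 :: l) (by simp; omega)
  have hrevlen := hrevlen0
  have h8 : (8 : Nat) = (8 - (pvBitsB n).reverse.length) + (pvBitsB n).reverse.length := by
    rw [hrevlen]; omega
  calc pvPadA 8 (pvBitsB n).reverse
      = pvPadA ((8 - (pvBitsB n).reverse.length) + (pvBitsB n).reverse.length) (pvBitsB n).reverse := by rw [← h8]
    _ = pvPadA (8 - (pvBitsB n).reverse.length) (pvBitsB n).reverse := by
        exact hsplit _ _ _ hfuel
    _ = List.replicate (8 - (pvBitsB n).reverse.length) 0 ++ (pvBitsB n).reverse := this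
    _ = List.replicate (8 - (pvBitsB n).length) 0 ++ (pvBitsB n).reverse := by rw [hrevlen]

theorem pvFoldl_eq (l : List Int) (acc : List Int) (h : ∀ n ∈ l, n < 256) :
    l.foldl (fun binary_list num => binary_list ++ pvPadA 8 (pvMechanism num)) acc =
    l.foldl (fun out num =>
      let bits := pvBitsB num
      out ++ List.replicate (8 - bits.length) 0 ++ bits.reverse) acc := by
  induction l generalizing acc with
  | nil => rfl
  | cons x xs ih =>
    simp only [List.foldl_cons]
    rw [pvElem_eq x (h x (by simp))]
    have : acc ++ (List.replicate (8 - (pvBitsB x).length) 0 ++ (pvBitsB x).reverse)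
         = acc ++ List.replicate (8 - (pvBitsB x).length) 0 ++ (pvBitsB x).reverse := by
      rw [List.append_assoc]
    rw [this]
    exact ih _ (fun n hn => h n (by simp [hn]))

-- ===== VERDICT (by name: the statement is the Claim_ definition above) =====
theorem ascii_list_binarizer_spec : Claim_equal_ascii_list_binarizer := by
  intro l _ hpre
  unfold Spec_ascii_list_binarizer ascii_list_binarizer ascii_list_binarizer_alt
  exact pvFoldl_eq l [] hpre
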